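-- pv_equiv track=rewrite | github.com/Lifeomics/SLOT | SLOT/model.py | mid_permu
-- ===== SOURCE A (Python) =====
-- def mid_permu(arr):
--     """
--     Rearrange a sorted array into a 'middle‐peaked' pattern:
--     largest in the center, then alternating to left/right.
--     """
--     sorted_arr = sorted(arr, reverse=True)
--     n = len(sorted_arr)
--     result = [0] * n
--     mid = n // 2
--     result[mid] = sorted_arr[0]
--     for i in range(1, n):
--         if i % 2 == 1:
--             result[mid - (i // 2 + 1)] = sorted_arr[i]
--         else:
--             result[mid + (i // 2)] = sorted_arr[i]
--     return result
-- ===== SOURCE B (Python) =====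
-- def mid_permu(arr):
--     s = sorted(arr, reverse=True)
--     center = [s[0]]
--     left = []
--     right = []
--     odd = True
--     for x in s[1:]:
--         if odd:
--             left.append(x)
--         else:
--             right.append(x)
--         odd = not odd
--     left.reverse()
--     return left + center + right
-- ===== Notes on version B (the rewrite author's own statement) =====
-- stated objective: simpler
-- what changed: Replaces the preallocated array with scatter-assignment at computed indices mid-(i//2+1)/mid+i//2 by a single alternating pass over the sorted tail that builds the left and right halves as lists and concatenates left(reversed) + [max] + right, with no index arithmetic.
-- outside the precondition, e.g. on mid_permu([]): A raises IndexError, B raises IndexError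
import Mathlib
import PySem

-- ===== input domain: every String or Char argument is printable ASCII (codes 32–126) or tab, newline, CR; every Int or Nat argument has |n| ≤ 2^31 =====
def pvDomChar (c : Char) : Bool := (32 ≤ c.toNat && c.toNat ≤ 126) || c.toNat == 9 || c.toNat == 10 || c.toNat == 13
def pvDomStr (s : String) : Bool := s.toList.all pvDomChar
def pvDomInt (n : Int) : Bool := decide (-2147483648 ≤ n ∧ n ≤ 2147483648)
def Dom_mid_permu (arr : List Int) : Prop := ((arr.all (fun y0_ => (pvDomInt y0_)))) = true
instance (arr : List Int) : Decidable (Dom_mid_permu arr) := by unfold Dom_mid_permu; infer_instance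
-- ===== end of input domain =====

-- B replaces A's scatter-assignment into a preallocated array (mid ± i//2 index arithmetic)
-- by one alternating pass over the sorted tail building the left/right halves, concatenated
-- around the maximum: simpler, no index arithmetic.

-- ===== PORT A =====
def mid_permu (arr : List Int) : List Int :=
  let sorted_arr := PySem.List.sorted arr (fun x => x) true
  let n : Int := (sorted_arr.length : Int)
  let result := List.replicate sorted_arr.length (0 : Int)
  let mid : Int := PySem.Int.floordiv n 2
  let result := PySem.List.pySetD result mid (PySem.List.pyGetD sorted_arr 0 0)
  (PySem.List.pyRange 1 n).foldl (fun r i =>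
    if PySem.Int.mod i 2 = 1 then
      PySem.List.pySetD r (mid - (PySem.Int.floordiv i 2 + 1)) (PySem.List.pyGetD sorted_arr i 0)
    else
      PySem.List.pySetD r (mid + PySem.Int.floordiv i 2) (PySem.List.pyGetD sorted_arr i 0)) result

-- ===== PORT B =====
def mid_permu_alt (arr : List Int) : List Int :=
  let s := PySem.List.sorted arr (fun x => x) true
  let center := [PySem.List.pyGetD s 0 0]
  let st := (PySem.List.slice s (some 1) none).foldl
      (fun (st : List Int × List Int × Bool) x =>
        if st.2.2 then (st.1 ++ [x], st.2.1, !st.2.2) else (st.1, st.2.1 ++ [x], !st.2.2))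
      ([], [], true)
  st.1.reverse ++ center ++ st.2.1

-- ===== PRECONDITION & SPEC =====
-- Pre_ excludes only the empty list, on which A raises IndexError (sorted_arr[0]).
def Pre_mid_permu (arr : List Int) : Prop := arr ≠ []
instance (arr : List Int) : Decidable (Pre_mid_permu arr) := by unfold Pre_mid_permu; infer_instance
def pvWitness_mid_permu : List Int := ([1, 3, 2] : List Int)

def Spec_mid_permu (arr : List Int) (out : List Int) : Prop := out = mid_permu_alt arr
instance (arr : List Int) (out : List Int) : Decidable (Spec_mid_permu arr out) := by unfold Spec_mid_permu; infer_instance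

-- ===== CLAIM (what is proved, stated in full; the proofs are below) =====
def Claim_equal_mid_permu : Prop := ∀ (arr : List Int), Dom_mid_permu arr → Pre_mid_permu arr → Spec_mid_permu arr (mid_permu arr)

-- ===== LEMMAS AND PROOFS =====

-- helper used only by the proofs: elements of t at even (b = true) / odd (b = false) positions
def altPick : Bool → List Int → List Int
  | _, [] => []
  | true, a :: t => a :: altPick false t
  | false, _ :: t => altPick true t

-- components of B's alternating fold
theorem altFold_fst (t : List Int) : ∀ (l r : List Int) (b : Bool),
    (t.foldl (fun (st : List Int × List Int × Bool) x =>
        if st.2.2 then (st.1 ++ [x], st.2.1, !st.2.2) else (st.1, st.2.1 ++ [x], !st.2.2))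
      (l, r, b)).1 = l ++ altPick b t := by
  induction t with
  | nil => simp [altPick]
  | cons x t ih =>
    intro l r b
    cases b <;> simp [List.foldl_cons, altPick, ih]

theorem altFold_snd (t : List Int) : ∀ (l r : List Int) (b : Bool),
    (t.foldl (fun (st : List Int × List Int × Bool) x =>
        if st.2.2 then (st.1 ++ [x], st.2.1, !st.2.2) else (st.1, st.2.1 ++ [x], !st.2.2))
      (l, r, b)).2.1 = r ++ altPick (!b) t := by
  induction t with
  | nil => simp [altPick]
  | cons x t ih =>
    intro l r b
    cases b <;> simp [List.foldl_cons, altPick, ih]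

theorem altPick_length (t : List Int) : ∀ b : Bool,
    (altPick b t).length = if b then (t.length + 1) / 2 else t.length / 2 := by
  induction t with
  | nil => intro b; cases b <;> simp [altPick]
  | cons x t ih =>
    intro b
    cases b
    · simp [altPick, ih]
    · simp [altPick, ih]; omega

theorem altPick_get? (t : List Int) : ∀ k : Nat,
    (altPick true t)[k]? = t[2 * k]? ∧ (altPick false t)[k]? = t[2 * k + 1]? := by
  induction t with
  | nil => intro k; simp [altPick]
  | cons x t ih =>
    intro k
    constructor
    · cases k with
      | zero => simp [altPick]
      | succ k =>
        have := (ih k).2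
        simp [altPick, this]
        rw [show 2 * (k + 1) = 2 * k + 1 + 1 by omega]
        simp
    · have := (ih k).1
      simp [altPick, this]

-- A's loop body, with the sorted list s and the Nat value M of mid fixed
def stepA (s : List Int) (M : Nat) (r : List Int) (i : Int) : List Int :=
  if PySem.Int.mod i 2 = 1 then
    PySem.List.pySetD r ((M : Int) - (PySem.Int.floordiv i 2 + 1)) (PySem.List.pyGetD s i 0)
  else
    PySem.List.pySetD r ((M : Int) + PySem.Int.floordiv i 2) (PySem.List.pyGetD s i 0)

-- target position of A's step i, as a Nat
def posA (M k : Nat) : Nat := if k % 2 = 1 then M - (k / 2 + 1) else M + k / 2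

-- which sorted index ends up at output position j (both programs)
def srcA (M j : Nat) : Nat := if j < M then 2 * (M - j) - 1 else if j = M then 0 else 2 * (j - M)

theorem stepA_eq (s : List Int) (M : Nat) (r : List Int) (k : Nat)
    (h1 : 1 ≤ k) (hodd : k % 2 = 1 → k / 2 + 1 ≤ M) :
    stepA s M r (k : Int) = r.set (posA M k) (s.getD k 0) := by
  unfold stepA posA
  have hm : PySem.Int.mod (k : Int) 2 = ((k % 2 : Nat) : Int) := PySem.Int.mod_natCast k 2
  have hf : PySem.Int.floordiv (k : Int) 2 = ((k / 2 : Nat) : Int) := PySem.Int.floordiv_natCast k 2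
  rw [hm, hf, PySem.List.pyGetD_natCast]
  by_cases hk : k % 2 = 1
  · have hle := hodd hk
    rw [if_pos (by exact_mod_cast hk), if_pos hk]
    rw [PySem.List.pySetD_of_nonneg _ _ (by omega)]
    have : ((M : Int) - (↑(k / 2) + 1)).toNat = M - (k / 2 + 1) := by omega
    rw [this]
  · rw [if_neg (by exact_mod_cast hk), if_neg hk]
    rw [PySem.List.pySetD_of_nonneg _ _ (by positivity)]
    have : ((M : Int) + ↑(k / 2)).toNat = M + k / 2 := by omega
    rw [this]

theorem foldA_length (s : List Int) (M : Nat) (L : List Int) :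
    ∀ r : List Int, (L.foldl (stepA s M) r).length = r.length := by
  induction L with
  | nil => intro r; rfl
  | cons i L ih =>
    intro r
    rw [List.foldl_cons, ih]
    unfold stepA
    split <;> simp [PySem.List.length_pySetD]

-- if no step of L writes position j, position j is untouched
theorem foldA_get?_untouched (s : List Int) (M : Nat) (L : List Int) (j : Nat)
    (hL : ∀ i ∈ L, ∃ k : Nat, i = (k : Int) ∧ 1 ≤ k ∧ (k % 2 = 1 → k / 2 + 1 ≤ M) ∧ posA M k ≠ j) :
    ∀ r : List Int, (L.foldl (stepA s M) r)[j]? = r[j]? := by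
  induction L with
  | nil => intro r; rfl
  | cons i L ih =>
    intro r
    obtain ⟨k, hik, h1, hodd, hne⟩ := hL i (by simp)
    rw [List.foldl_cons, ih (fun i hi => hL i (by simp [hi])), hik,
      stepA_eq s M r k h1 hodd, List.getElem?_set_ne hne]

theorem foldA_get (s : List Int) (hs : s ≠ []) (j : Nat) (hj : j < s.length) :
    ((PySem.List.pyRange 1 (s.length : Int)).foldl (stepA s (s.length / 2))
      ((List.replicate s.length (0 : Int)).set (s.length / 2) (s.getD 0 0)))[j]? =
    s[srcA (s.length / 2) j]? := by
  set n := s.length with hn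
  have hn1 : 1 ≤ n := by
    cases s with
    | nil => exact absurd rfl hs
    | cons a t => simp [hn]
  set M := n / 2 with hM
  have hmem : ∀ (a : Nat) (i : Int), i ∈ PySem.List.pyRange (a : Int) (n : Int) →
      ∃ k : Nat, i = (k : Int) ∧ a ≤ k ∧ k < n := by
    intro a i hi
    rw [PySem.List.mem_pyRange_one] at hi
    exact ⟨i.toNat, by omega, by omega, by omega⟩
  have hoddk : ∀ k : Nat, k < n → k % 2 = 1 → k / 2 + 1 ≤ M := by intro k h1 h2; omega
  rcases lt_trichotomy j M with hjM | hjM | hjM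
  · -- j < M : the writer is i0 = 2*(M-j)-1, odd
    set k0 : Nat := 2 * (M - j) - 1 with hk0
    have h1 : 1 ≤ k0 := by omega
    have h2 : k0 < n := by omega
    rw [PySem.List.pyRange_one_append 1 (k0 : Int) (n : Int) (by omega) (by omega),
      List.foldl_append,
      PySem.List.pyRange_one_cons (show (k0 : Int) < (n : Int) by omega), List.foldl_cons]
    rw [foldA_get?_untouched s M _ j (by
      intro i hi
      obtain ⟨k, rfl, hk1, hk2⟩ := hmem (k0 + 1) i (by exact_mod_cast hi)
      exact ⟨k, rfl, by omega, hoddk k hk2, by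
        by_cases ho : k % 2 = 1
        · have := hoddk k hk2 ho
          unfold posA; rw [if_pos ho]; omega
        · unfold posA; rw [if_neg ho]; omega⟩)]
    rw [stepA_eq s M _ k0 h1 (fun _ => by omega)]
    have hpos : posA M k0 = j := by unfold posA; rw [if_pos (by omega)]; omega
    rw [hpos]
    have hlen : j < ((PySem.List.pyRange 1 (k0:Int)).foldl (stepA s M)
        ((List.replicate n (0 : Int)).set M (s.getD 0 0))).length := by
      rw [foldA_length]; simp; omega
    rw [List.getElem?_set_self hlen]
    have : srcA M j = k0 := by unfold srcA; rw [if_pos hjM]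
    rw [this, List.getD_eq_getElem s 0 (by omega), List.getElem?_eq_getElem (by omega)]
  · -- j = M : nothing writes there, the initial set is the value
    rw [foldA_get?_untouched s M _ j (by
      intro i hi
      obtain ⟨k, rfl, hk1, hk2⟩ := hmem 1 i (by exact_mod_cast hi)
      exact ⟨k, rfl, hk1, hoddk k hk2, by
        by_cases ho : k % 2 = 1
        · have := hoddk k hk2 ho
          unfold posA; rw [if_pos ho]; omega
        · unfold posA; rw [if_neg ho]; omega⟩)]
    rw [hjM, List.getElem?_set_self (by simp; omega)]
    have hsrc : srcA M M = 0 := by unfold srcA; rw [if_neg (by omega), if_pos rfl]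
    rw [hsrc, List.getD_eq_getElem s 0 (by omega), List.getElem?_eq_getElem (by omega)]
  · -- j > M : the writer is i0 = 2*(j-M), even
    set k0 : Nat := 2 * (j - M) with hk0
    have h1 : 1 ≤ k0 := by omega
    have h2 : k0 < n := by omega
    rw [PySem.List.pyRange_one_append 1 (k0 : Int) (n : Int) (by omega) (by omega),
      List.foldl_append,
      PySem.List.pyRange_one_cons (show (k0 : Int) < (n : Int) by omega), List.foldl_cons]
    rw [foldA_get?_untouched s M _ j (by
      intro i hi
      obtain ⟨k, rfl, hk1, hk2⟩ := hmem (k0 + 1) i (by exact_mod_cast hi)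
      exact ⟨k, rfl, by omega, hoddk k hk2, by
        by_cases ho : k % 2 = 1
        · have := hoddk k hk2 ho
          unfold posA; rw [if_pos ho]; omega
        · unfold posA; rw [if_neg ho]; omega⟩)]
    rw [stepA_eq s M _ k0 h1 (fun hc => by omega)]
    have hpos : posA M k0 = j := by unfold posA; rw [if_neg (by omega)]; omega
    rw [hpos]
    have hlen : j < ((PySem.List.pyRange 1 (k0:Int)).foldl (stepA s M)
        ((List.replicate n (0 : Int)).set M (s.getD 0 0))).length := by
      rw [foldA_length]; simp; omega
    rw [List.getElem?_set_self hlen]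
    have : srcA M j = k0 := by unfold srcA; rw [if_neg (by omega), if_neg (by omega)]
    rw [this, List.getD_eq_getElem s 0 (by omega), List.getElem?_eq_getElem (by omega)]

theorem B_get (s : List Int) (hs : s ≠ []) (j : Nat) (hj : j < s.length) :
    ((altPick true s.tail).reverse ++ [s.getD 0 0] ++ altPick false s.tail)[j]? =
    s[srcA (s.length / 2) j]? := by
  set n := s.length with hn
  have hn1 : 1 ≤ n := by
    cases s with
    | nil => exact absurd rfl hs
    | cons a t => simp [hn]
  set M := n / 2 with hM
  have ht : s.tail.length = n - 1 := by simp [hn]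
  have hL : (altPick true s.tail).length = M := by
    rw [altPick_length, if_pos rfl, ht]; omega
  have hLl : (altPick true s.tail).reverse.length = M := by rw [List.length_reverse, hL]
  rcases lt_trichotomy j M with hjM | hjM | hjM
  · rw [List.getElem?_append, if_pos (by rw [List.length_append, hLl]; simp; omega),
      List.getElem?_append, if_pos (by omega),
      List.getElem?_reverse (by omega), hL, (altPick_get? s.tail (M - 1 - j)).1,
      List.getElem?_tail]
    have : srcA M j = 2 * (M - 1 - j) + 1 := by unfold srcA; rw [if_pos hjM]; omega
    rw [this]
  · rw [List.getElem?_append, if_pos (by rw [List.length_append, hLl]; simp; omega),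
      List.getElem?_append_right (by omega), hLl, hjM]
    have hz : M - M = 0 := by omega
    rw [hz]
    have : srcA M M = 0 := by unfold srcA; rw [if_neg (by omega), if_pos rfl]
    rw [this]
    simp [List.getElem?_eq_getElem (show (0:Nat) < s.length by omega)]
  · rw [List.getElem?_append, if_neg (by rw [List.length_append, hLl]; simp; omega),
      List.length_append, hLl]
    have hidx : j - (M + 1) = j - M - 1 := by omega
    rw [List.length_singleton, hidx, (altPick_get? s.tail (j - M - 1)).2, List.getElem?_tail]
    have : srcA M j = 2 * (j - M - 1) + 1 + 1 := by
      unfold srcA; rw [if_neg (by omega), if_neg (by omega)]; omega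
    rw [this]

-- the common core, with the sorted list abstracted
theorem core_eq (s : List Int) (hs : s ≠ []) :
    (PySem.List.pyRange 1 (s.length : Int)).foldl (fun r i =>
      if PySem.Int.mod i 2 = 1 then
        PySem.List.pySetD r (PySem.Int.floordiv (s.length : Int) 2 - (PySem.Int.floordiv i 2 + 1)) (PySem.List.pyGetD s i 0)
      else
        PySem.List.pySetD r (PySem.Int.floordiv (s.length : Int) 2 + PySem.Int.floordiv i 2) (PySem.List.pyGetD s i 0))
      (PySem.List.pySetD (List.replicate s.length (0 : Int)) (PySem.Int.floordiv (s.length : Int) 2) (PySem.List.pyGetD s 0 0)) =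
    ((PySem.List.slice s (some 1) none).foldl
        (fun (st : List Int × List Int × Bool) x =>
          if st.2.2 then (st.1 ++ [x], st.2.1, !st.2.2) else (st.1, st.2.1 ++ [x], !st.2.2))
        ([], [], true)).1.reverse ++ [PySem.List.pyGetD s 0 0] ++
    ((PySem.List.slice s (some 1) none).foldl
        (fun (st : List Int × List Int × Bool) x =>
          if st.2.2 then (st.1 ++ [x], st.2.1, !st.2.2) else (st.1, st.2.1 ++ [x], !st.2.2))
        ([], [], true)).2.1 := by
  have hmid : PySem.Int.floordiv (s.length : Int) 2 = ((s.length / 2 : Nat) : Int) := by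
    exact_mod_cast PySem.Int.floordiv_natCast s.length 2
  have hget0 : PySem.List.pyGetD s 0 0 = s.getD 0 0 := PySem.List.pyGetD_ofNat' s 0 0
  rw [hmid, hget0, PySem.List.pySetD_natCast, PySem.List.slice_from_one,
    altFold_fst, altFold_snd]
  simp only [List.nil_append, Bool.not_true]
  have hstep : (fun (r : List Int) (i : Int) =>
      if PySem.Int.mod i 2 = 1 then
        PySem.List.pySetD r (((s.length / 2 : Nat) : Int) - (PySem.Int.floordiv i 2 + 1)) (PySem.List.pyGetD s i 0)
      else
        PySem.List.pySetD r (((s.length / 2 : Nat) : Int) + PySem.Int.floordiv i 2) (PySem.List.pyGetD s i 0)) =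
      stepA s (s.length / 2) := rfl
  rw [hstep]
  have hn1 : 1 ≤ s.length := by
    cases s with
    | nil => exact absurd rfl hs
    | cons a t => simp
  have ht : s.tail.length = s.length - 1 := by simp
  apply List.ext_getElem?
  intro j
  by_cases hj : j < s.length
  · rw [foldA_get s hs j hj, B_get s hs j hj]
  · rw [List.getElem?_eq_none (by rw [foldA_length]; simp; omega),
      List.getElem?_eq_none (by
        simp only [List.length_append, List.length_reverse, List.length_singleton,
          altPick_length, ht]
        simp
        omega)]

-- ===== VERDICT (by name: the statement is the Claim_ definition above) =====
theorem mid_permu_spec : Claim_equal_mid_permu := by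
  intro arr _ hpre
  show mid_permu arr = mid_permu_alt arr
  exact core_eq (PySem.List.sorted arr (fun x => x) true)
    (by rw [Ne, PySem.List.sorted_eq_nil_iff]; exact hpre)
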